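-- pv_equiv track=rewrite | github.com/Guenter-1953/matricula-webdownloader | build_families_from_persons.py | extract_key_parts
-- ===== SOURCE A (Python) =====
-- from typing import Any, Dict, List, Tuple
--
-- def safe_str(value: Any) -> str:
--     if value is None:
--         return ""
--     return str(value).strip()
--
-- def normalize_name(value: Any) -> str:
--     text = safe_str(value).lower()
--     text = text.replace("ä", "ae").replace("ö", "oe").replace("ü", "ue").replace("ß", "ss")
--     text = " ".join(text.split())
--     return text
--
-- def extract_key_parts(persons: List[Dict[str, Any]], event: Dict[str, Any]) -> Tuple[str, str, str]:
--     father_name = ""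
--     mother_name = ""
--     place = safe_str((event or {}).get("place"))
--
--     for person in persons:
--         if not isinstance(person, dict):
--             continue
--         role = safe_str(person.get("role")).lower()
--         full_name = safe_str(person.get("full_name")) or safe_str(person.get("name_original"))
--
--         if role == "father" and full_name and not father_name:
--             father_name = full_name
--         elif role == "mother" and full_name and not mother_name:
--             mother_name = full_name
--
--     return (
--         normalize_name(father_name),
--         normalize_name(mother_name),
--         normalize_name(place),
--     )
-- ===== SOURCE B (Python) =====
-- def safe_str(value):
--     if value is None:
--         return ""
--     return str(value).strip()
--
--
-- def normalize_name(value):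
--     text = safe_str(value).lower()
--     text = text.replace("ä", "ae").replace("ö", "oe").replace("ü", "ue").replace("ß", "ss")
--     text = " ".join(text.split())
--     return text
--
--
-- def extract_key_parts(persons, event):
--     def first_named(role):
--         return next(
--             (safe_str(p.get("full_name")) or safe_str(p.get("name_original"))
--              for p in persons
--              if isinstance(p, dict)
--              and safe_str(p.get("role")).lower() == role
--              and (safe_str(p.get("full_name")) or safe_str(p.get("name_original")))),
--             "",
--         )
--
--     place = safe_str((event or {}).get("place"))
--     return (
--         normalize_name(first_named("father")),
--         normalize_name(first_named("mother")),
--         normalize_name(place),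
--     )
-- ===== Notes on version B (the rewrite author's own statement) =====
-- stated objective: idiomatic
-- what changed: Replaces A's single stateful fold carrying (father_name, mother_name) with two independent first-match scans (next over a generator) per role, eliminating the mutable accumulators.
import Mathlib
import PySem

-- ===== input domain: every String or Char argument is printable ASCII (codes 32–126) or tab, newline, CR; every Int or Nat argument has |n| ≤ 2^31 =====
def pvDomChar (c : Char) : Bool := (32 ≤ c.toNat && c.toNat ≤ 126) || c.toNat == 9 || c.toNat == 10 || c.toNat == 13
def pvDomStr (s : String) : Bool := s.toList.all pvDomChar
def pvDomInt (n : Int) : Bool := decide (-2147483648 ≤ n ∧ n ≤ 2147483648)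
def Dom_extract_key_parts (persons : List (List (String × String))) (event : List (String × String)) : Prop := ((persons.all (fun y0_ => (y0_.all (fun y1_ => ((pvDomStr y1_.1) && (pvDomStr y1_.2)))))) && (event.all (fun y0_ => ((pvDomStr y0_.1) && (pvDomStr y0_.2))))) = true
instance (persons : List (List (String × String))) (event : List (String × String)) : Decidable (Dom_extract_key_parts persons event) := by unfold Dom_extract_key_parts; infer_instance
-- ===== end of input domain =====

-- B replaces A's single stateful loop carrying (father_name, mother_name) with two independent
-- first-match scans, one per role (more idiomatic; same O(n) cost up to a constant).


-- shared helpers (both Pythons use safe_str / normalize_name and the same field lookups)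
-- safe_str(d.get(k)) : None -> "", else str(v).strip()
def pvSafeStrO (o : Option String) : String :=
  match o with
  | none => ""
  | some v => PySem.Str.strip v

-- normalize_name: lower, umlaut replacements (no-ops on the ASCII domain but ported literally), whitespace collapse
def pvNormName (s : String) : String :=
  let t := PySem.Str.lower (PySem.Str.strip s)
  let t := PySem.Str.replace (PySem.Str.replace (PySem.Str.replace (PySem.Str.replace t "ä" "ae") "ö" "oe") "ü" "ue") "ß" "ss"
  PySem.Str.join " " (PySem.Str.split₀ t)

-- safe_str(person.get("role")).lower()
def pvRole (p : List (String × String)) : String :=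
  PySem.Str.lower (pvSafeStrO ((PySem.Dict.mk p).get? "role"))

-- safe_str(person.get("full_name")) or safe_str(person.get("name_original"))
def pvFullName (p : List (String × String)) : String :=
  let fn := pvSafeStrO ((PySem.Dict.mk p).get? "full_name")
  if fn ≠ "" then fn else pvSafeStrO ((PySem.Dict.mk p).get? "name_original")

-- ===== PORT A =====
def extract_key_parts (persons : List (List (String × String))) (event : List (String × String)) : String × String × String :=
  let place := pvSafeStrO (if event = [] then none else (PySem.Dict.mk event).get? "place")
  let st := persons.foldl (fun (st : String × String) person =>
      let role := pvRole person
      let full := pvFullName person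
      if role = "father" ∧ full ≠ "" ∧ st.1 = "" then (full, st.2)
      else if role = "mother" ∧ full ≠ "" ∧ st.2 = "" then (st.1, full)
      else st) ("", "")
  (pvNormName st.1, pvNormName st.2, pvNormName place)

-- ===== PORT B =====
-- first_named(role): first person whose lowered role matches and whose name is non-empty, else ""
def pvFirstNamed : List (List (String × String)) → String → String
  | [], _ => ""
  | p :: rest, role =>
      if pvRole p = role ∧ pvFullName p ≠ "" then pvFullName p else pvFirstNamed rest role

def extract_key_parts_alt (persons : List (List (String × String))) (event : List (String × String)) : String × String × String :=
  let place := pvSafeStrO (if event = [] then none else (PySem.Dict.mk event).get? "place")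
  (pvNormName (pvFirstNamed persons "father"),
   pvNormName (pvFirstNamed persons "mother"),
   pvNormName place)

-- ===== PRECONDITION & SPEC =====
def Spec_extract_key_parts (persons : List (List (String × String))) (event : List (String × String)) (out : String × String × String) : Prop := out = extract_key_parts_alt persons event
instance (persons : List (List (String × String))) (event : List (String × String)) (out : String × String × String) : Decidable (Spec_extract_key_parts persons event out) := by unfold Spec_extract_key_parts; infer_instance

-- ===== CLAIM (what is proved, stated in full; the proofs are below) =====
def Claim_equal_extract_key_parts : Prop := ∀ (persons : List (List (String × String))) (event : List (String × String)), Dom_extract_key_parts persons event → Spec_extract_key_parts persons event (extract_key_parts persons event)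

-- ===== LEMMAS AND PROOFS =====

-- loop invariant: A's fold from state (f, m) keeps a non-empty name, otherwise takes the first match
theorem pv_fold_eq (persons : List (List (String × String))) (f m : String) :
    persons.foldl (fun (st : String × String) person =>
      let role := pvRole person
      let full := pvFullName person
      if role = "father" ∧ full ≠ "" ∧ st.1 = "" then (full, st.2)
      else if role = "mother" ∧ full ≠ "" ∧ st.2 = "" then (st.1, full)
      else st) (f, m)
    = ((if f = "" then pvFirstNamed persons "father" else f),
       (if m = "" then pvFirstNamed persons "mother" else m)) := by
  induction persons generalizing f m with
  | nil => simp [pvFirstNamed]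
  | cons p rest ih =>
    simp only [List.foldl_cons, pvFirstNamed]
    split_ifs with h1 h2 <;> simp_all

-- ===== VERDICT (by name: the statement is the Claim_ definition above) =====
theorem extract_key_parts_spec : Claim_equal_extract_key_parts := by
  intro persons event _
  show _ = _
  unfold extract_key_parts extract_key_parts_alt
  simp [pv_fold_eq]
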